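-- pv_equiv track=rewrite | github.com/eliottcassidy2000/math | 04-computation/dihedral_keys_connection.py | cayley_adj_n
-- ===== SOURCE A (Python) =====
-- from itertools import permutations as perms
--
-- def cayley_adj_n(n):
--     """Build adjacency list of Cayley graph S_n with adjacent transpositions."""
--     all_perms = list(perms(range(n)))
--     perm_to_idx = {p: i for i, p in enumerate(all_perms)}
--     adj = [[] for _ in range(len(all_perms))]
--     for idx, p in enumerate(all_perms):
--         for k in range(n-1):
--             q = list(p)
--             q[k], q[k+1] = q[k+1], q[k]
--             q = tuple(q)
--             adj[idx].append(perm_to_idx[q])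
--     return all_perms, adj
-- ===== SOURCE B (Python) =====
-- from itertools import permutations as perms
--
--
-- def _fact(m):
--     f = 1
--     for i in range(2, m + 1):
--         f *= i
--     return f
--
--
-- def _rank(q):
--     """Lexicographic (Lehmer) rank of q among the permutations of its elements."""
--     if len(q) <= 1:
--         return 0
--     smaller = sum(1 for y in q[1:] if y < q[0])
--     return smaller * _fact(len(q) - 1) + _rank(q[1:])
--
--
-- def cayley_adj_n(n):
--     """Build adjacency list of Cayley graph S_n with adjacent transpositions."""
--     all_perms = list(perms(range(n)))
--     adj = []
--     for p in all_perms: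
--         row = []
--         for k in range(n - 1):
--             q = list(p)
--             q[k], q[k + 1] = q[k + 1], q[k]
--             row.append(_rank(tuple(q)))
--         adj.append(row)
--     return all_perms, adj
-- ===== Notes on version B (the rewrite author's own statement) =====
-- stated objective: alternative
-- what changed: The perm_to_idx hash table is dropped entirely: each swapped permutation's index is computed arithmetically as its Lehmer (factorial-number-system) lexicographic rank, which coincides with its position in itertools.permutations' output.
import Mathlib
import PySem

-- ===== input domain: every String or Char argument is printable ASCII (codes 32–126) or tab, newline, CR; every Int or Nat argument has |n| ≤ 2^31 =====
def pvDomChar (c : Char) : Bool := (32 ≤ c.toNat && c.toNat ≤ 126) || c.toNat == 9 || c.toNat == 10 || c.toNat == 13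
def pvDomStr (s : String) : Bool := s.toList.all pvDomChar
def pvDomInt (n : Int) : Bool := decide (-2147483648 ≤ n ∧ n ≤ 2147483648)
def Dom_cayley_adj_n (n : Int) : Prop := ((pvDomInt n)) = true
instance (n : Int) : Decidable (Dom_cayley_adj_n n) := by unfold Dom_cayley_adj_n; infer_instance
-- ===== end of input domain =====

-- B drops the perm_to_idx hash table and instead computes each swapped permutation's index
-- arithmetically as its Lehmer (lexicographic) rank; same return value, different algorithm.


-- ===== PORT A =====
-- q = list(p); q[k], q[k+1] = q[k+1], q[k]  (both Pythons contain this identical swap;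
-- k and k+1 are always in range here, so the total getD/set forms are exact)
def pvSwapAdj (p : List Int) (k : Nat) : List Int :=
  (p.set k (p.getD (k+1) 0)).set (k+1) (p.getD k 0)

def cayley_adj_n (n : Int) : List (List Int) × List (List Int) :=
  let s := PySem.List.pyRange 0 n 1                                      -- range(n)
  let all_perms := PySem.List.permutations s s.length                    -- list(perms(range(n)))
  let perm_to_idx : PySem.Dict (List Int) Int :=                         -- {p: i for i, p in enumerate(all_perms)}
    (PySem.List.enumerate all_perms).foldl (fun d ip => d.insert ip.2 ip.1) PySem.Dict.empty
  let adj := (PySem.List.enumerate all_perms).map (fun ip =>             -- for idx, p in enumerate(all_perms)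
    (PySem.List.pyRange 0 (n-1) 1).map (fun k =>                         -- for k in range(n-1)
      (perm_to_idx.get? (pvSwapAdj ip.2 k.toNat)).getD 0))               -- perm_to_idx[q] (key always present)
  (all_perms, adj)

-- ===== PORT B =====
-- _fact(m) = product of range(2, m+1)
def pvFact (m : Int) : Int := (PySem.List.pyRange 2 (m+1) 1).foldl (· * ·) 1

-- _rank(q): recursive Lehmer rank
def pvRank : List Int → Int
  | [] => 0
  | [_] => 0
  | x :: t => ((t.map (fun y => if y < x then (1:Int) else 0)).sum) * pvFact (t.length) + pvRank t

def cayley_adj_n_alt (n : Int) : List (List Int) × List (List Int) :=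
  let s := PySem.List.pyRange 0 n 1
  let all_perms := PySem.List.permutations s s.length
  let adj := all_perms.map (fun p =>
    (PySem.List.pyRange 0 (n-1) 1).map (fun k => pvRank (pvSwapAdj p k.toNat)))
  (all_perms, adj)

-- ===== PRECONDITION & SPEC =====
def Spec_cayley_adj_n (n : Int) (out : List (List Int) × List (List Int)) : Prop := out = cayley_adj_n_alt n
instance (n : Int) (out : List (List Int) × List (List Int)) : Decidable (Spec_cayley_adj_n n out) := by unfold Spec_cayley_adj_n; infer_instance

-- ===== CLAIM (what is proved, stated in full; the proofs are below) =====
def Claim_equal_cayley_adj_n : Prop := ∀ (n : Int), Dom_cayley_adj_n n → Spec_cayley_adj_n n (cayley_adj_n n)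

-- ===== LEMMAS AND PROOFS =====

-- unfolding equation for PySem.List.permutations at a successor arity
theorem pv_permutations_succ (xs : List Int) (r : Nat) : PySem.List.permutations xs (r+1) =
    (List.range xs.length).flatMap (fun i => (PySem.List.permutations (xs.eraseIdx i) r).map (fun p => xs.getD i 0 :: p)) := by
  rw [PySem.List.permutations]
  unfold List.flatMap
  congr 1
  apply List.map_congr_left
  intro i hi
  rw [List.mem_range] at hi
  rw [List.getElem?_eq_getElem hi]
  simp [List.getD, List.getElem?_eq_getElem hi]

theorem pv_length_permutations : ∀ (m : Nat) (xs : List Int), xs.length = m →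
    (PySem.List.permutations xs m).length = m.factorial := by
  intro m
  induction m with
  | zero => intro xs _; rfl
  | succ m ih =>
      intro xs hlen
      rw [pv_permutations_succ, List.length_flatMap]
      have hconst : ∀ i ∈ List.range xs.length,
          ((PySem.List.permutations (xs.eraseIdx i) m).map (fun p => xs.getD i 0 :: p)).length = m.factorial := by
        intro i hi
        rw [List.mem_range] at hi
        rw [List.length_map, ih _ (by rw [List.length_eraseIdx]; simp [hi]; omega)]
      calc (List.map (fun i => ((PySem.List.permutations (xs.eraseIdx i) m).map (fun p => xs.getD i 0 :: p)).length) (List.range xs.length)).sum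
          = (List.map (fun _ => m.factorial) (List.range xs.length)).sum := by
            apply congrArg; exact List.map_congr_left hconst
        _ = (m+1).factorial := by
            simp [List.map_const', List.sum_replicate, hlen, Nat.factorial_succ]

-- head/tail decomposition of membership
theorem pv_mem_permutations_cons {xs : List Int} {m : Nat} {x : Int} {t : List Int}
    (hnd : xs.Nodup) (hlen : xs.length = m+1) (hmem : (x :: t) ∈ PySem.List.permutations xs (m+1)) :
    x ∈ xs ∧ t ∈ PySem.List.permutations (xs.erase x) m := by
  rw [pv_permutations_succ] at hmem
  rcases List.mem_flatMap.1 hmem with ⟨i, hi, hmemi⟩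
  rw [List.mem_range] at hi
  rcases List.mem_map.1 hmemi with ⟨t', ht', heq⟩
  injection heq with hx ht
  subst ht
  have hgi : xs[i] = x := by rw [← hx, List.getD_eq_getElem _ _ hi]
  have hxmem : x ∈ xs := hgi ▸ List.getElem_mem hi
  refine ⟨hxmem, ?_⟩
  have hidx : xs.idxOf x = i := by rw [← hgi]; exact hnd.idxOf_getElem i hi
  rw [List.erase_eq_eraseIdx_of_idxOf hidx]
  exact ht'

-- completeness: every rearrangement is in the list
theorem pv_mem_permutations_of_perm : ∀ (m : Nat) (s q : List Int), s.length = m → q.Perm s →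
    q ∈ PySem.List.permutations s m := by
  intro m
  induction m with
  | zero =>
      intro s q hlen hperm
      have hs : s = [] := List.eq_nil_of_length_eq_zero hlen
      subst hs
      have : q = [] := hperm.eq_nil
      simp [this, PySem.List.permutations_zero]
  | succ m ih =>
      intro s q hlen hperm
      have hql : q.length = m+1 := by rw [hperm.length_eq, hlen]
      cases q with
      | nil => simp at hql
      | cons x t =>
          have hxs : x ∈ s := hperm.mem_iff.1 (List.mem_cons_self)
          have hi : s.idxOf x < s.length := List.idxOf_lt_length_of_mem hxs
          rw [pv_permutations_succ]
          apply List.mem_flatMap.2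
          refine ⟨s.idxOf x, List.mem_range.2 hi, ?_⟩
          apply List.mem_map.2
          have hger : s.erase x = s.eraseIdx (s.idxOf x) := List.erase_eq_eraseIdx_of_idxOf rfl
          have htperm : t.Perm (s.erase x) :=
            ((hperm.trans (List.perm_cons_erase hxs))).cons_inv
          refine ⟨t, ?_, ?_⟩
          · rw [← hger]
            exact ih _ t (by rw [List.length_erase]; simp [hxs, hlen]) htperm
          · have : s.getD (s.idxOf x) 0 = x := by
              rw [List.getD_eq_getElem _ _ hi]; exact List.getElem_idxOf hi
            rw [this]

-- idxOf inside a cons-mapped block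
theorem pv_idxOf_map_cons (x : Int) : ∀ (L : List (List Int)) (t : List Int),
    ((L.map (x :: ·)).idxOf (x :: t)) = L.idxOf t := by
  intro L
  induction L with
  | nil => intro t; rfl
  | cons b L ih =>
      intro t
      by_cases hb : b = t
      · simp [hb]
      · have hne : (x :: b) ≠ (x :: t) := by simp [hb]
        simp [hne, hb, ih]

-- nodup of the permutation list
theorem pv_nodup_permutations : ∀ (m : Nat) (s : List Int), s.Nodup → s.length = m →
    (PySem.List.permutations s m).Nodup := by
  intro m
  induction m with
  | zero => intro s _ _; simp [PySem.List.permutations_zero]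
  | succ m ih =>
      intro s hnd hlen
      rw [pv_permutations_succ]
      apply List.nodup_flatMap.2
      constructor
      · intro i hi
        rw [List.mem_range] at hi
        exact ((ih _ (hnd.eraseIdx i) (by rw [List.length_eraseIdx]; simp [hi]; omega)).map
          (fun a b h => by injection h))
      · rw [List.pairwise_iff_getElem]
        intro a b ha hb hab
        simp only [List.getElem_range, List.length_range] at ha hb ⊢
        intro q hqa hqb
        rcases List.mem_map.1 hqa with ⟨t1, _, hq1⟩
        rcases List.mem_map.1 hqb with ⟨t2, _, hq2⟩
        rw [← hq1] at hq2
        injection hq2 with hheads _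
        rw [List.getD_eq_getElem _ _ ha, List.getD_eq_getElem _ _ hb] at hheads
        exact absurd ((List.Nodup.getElem_inj_iff hnd).1 hheads.symm) (Nat.ne_of_lt hab)

-- sorted strict: countP (< x) = idxOf
theorem pv_countP_lt_eq_idxOf : ∀ (s : List Int) (x : Int), s.Pairwise (· < ·) → x ∈ s →
    s.countP (fun y => decide (y < x)) = s.idxOf x := by
  intro s
  induction s with
  | nil => intro x _ h; simp at h
  | cons a s ih =>
      intro x hp hx
      rcases List.mem_cons.1 hx with h | h
      · subst h
        have hall : ∀ y ∈ s, x < y := (List.pairwise_cons.1 hp).1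
        have : s.countP (fun y => decide (y < x)) = 0 := by
          apply List.countP_eq_zero.2
          intro y hy
          simp [not_lt.2 (le_of_lt (hall y hy))]
        simp [this]
      · have hax : a < x := (List.pairwise_cons.1 hp).1 x h
        have hne : a ≠ x := ne_of_lt hax
        rw [List.countP_cons]
        simp [hax, hne, ih x (List.pairwise_cons.1 hp).2 h]

-- pvFact is the factorial
theorem pv_fact_eq : ∀ (m : Nat), pvFact (m : Int) = (m.factorial : Int) := by
  intro m
  induction m with
  | zero => rfl
  | succ m ih =>
      rcases Nat.eq_zero_or_pos m with hm | hm
      · subst hm; rfl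
      · have h2 : (2:Int) ≤ (m:Int) + 1 := by exact_mod_cast Nat.succ_le_succ hm
        have hsplit : PySem.List.pyRange 2 ((m:Int)+1+1) 1
            = PySem.List.pyRange 2 ((m:Int)+1) 1 ++ [(m:Int)+1] :=
          PySem.List.pyRange_one_succ_right h2
        unfold pvFact at ih ⊢
        rw [show (((m+1:Nat):Int)+1) = ((m:Int)+1)+1 by push_cast; ring, hsplit, List.foldl_append, ih]
        simp [Nat.factorial_succ]
        ring

-- pvRank unfolding on any cons
theorem pv_rank_cons (x : Int) (t : List Int) :
    pvRank (x :: t) = ((t.map (fun y => if y < x then (1:Int) else 0)).sum) * pvFact (t.length) + pvRank t := by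
  cases t with
  | nil => simp [pvRank, pvFact, PySem.List.pyRange]
  | cons y t => rfl

-- the index decomposition lemma (the crux)
theorem pv_idxOf_permutations_cons {s : List Int} {m : Nat} {x : Int} {t : List Int}
    (hnd : s.Nodup) (hlen : s.length = m+1) (hmem : (x :: t) ∈ PySem.List.permutations s (m+1)) :
    (PySem.List.permutations s (m+1)).idxOf (x :: t)
      = (s.idxOf x) * m.factorial + (PySem.List.permutations (s.erase x) m).idxOf t := by
  obtain ⟨hx, ht⟩ := pv_mem_permutations_cons hnd hlen hmem
  have hjlt : s.idxOf x < s.length := List.idxOf_lt_length_of_mem hx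
  have hjm : s.idxOf x ≤ m := by omega
  have hgj : s.getD (s.idxOf x) 0 = x := by
    rw [List.getD_eq_getElem _ _ hjlt]; exact List.getElem_idxOf hjlt
  have herase : s.erase x = s.eraseIdx (s.idxOf x) := List.erase_eq_eraseIdx_of_idxOf rfl
  have hsplit : List.range s.length
      = List.range (s.idxOf x) ++ ((s.idxOf x) :: List.range' (s.idxOf x + 1) (m - s.idxOf x)) := by
    rw [hlen, List.range_eq_range', show m+1 = s.idxOf x + (m+1-s.idxOf x) by omega, ← List.range'_append_1]
    congr 1
    · exact (List.range_eq_range').symm ▸ rfl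
    · rw [show m+1-s.idxOf x = (m-s.idxOf x)+1 by omega, List.range'_succ]
      simp
  rw [pv_permutations_succ, hsplit, List.flatMap_append, List.flatMap_cons]
  -- q not in the prefix blocks
  have hnotmem : (x :: t) ∉ (List.range (s.idxOf x)).flatMap
      (fun i => (PySem.List.permutations (s.eraseIdx i) m).map (fun p => s.getD i 0 :: p)) := by
    intro hcon
    rcases List.mem_flatMap.1 hcon with ⟨i, hi, hmi⟩
    rw [List.mem_range] at hi
    rcases List.mem_map.1 hmi with ⟨t', _, heq⟩
    injection heq with hh _
    have hilt : i < s.length := by omega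
    rw [List.getD_eq_getElem _ _ hilt] at hh
    have : s.idxOf x ≤ i := by
      rw [← hh]; exact le_of_eq (hnd.idxOf_getElem i hilt)
    omega
  rw [List.idxOf_append_of_notMem hnotmem]
  -- the prefix length
  have hplen : ((List.range (s.idxOf x)).flatMap
      (fun i => (PySem.List.permutations (s.eraseIdx i) m).map (fun p => s.getD i 0 :: p))).length
      = s.idxOf x * m.factorial := by
    rw [List.length_flatMap]
    have : ∀ i ∈ List.range (s.idxOf x),
        ((PySem.List.permutations (s.eraseIdx i) m).map (fun p => s.getD i 0 :: p)).length = m.factorial := by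
      intro i hi
      rw [List.mem_range] at hi
      rw [List.length_map, pv_length_permutations m _ (by rw [List.length_eraseIdx]; simp [show i < s.length by omega]; omega)]
    rw [List.map_congr_left this]
    simp [List.map_const', List.sum_replicate]
  rw [hplen]
  -- q is in block j
  have hmemj : (x :: t) ∈ (PySem.List.permutations (s.eraseIdx (s.idxOf x)) m).map (fun p => s.getD (s.idxOf x) 0 :: p) := by
    rw [hgj]
    exact List.mem_map.2 ⟨t, herase ▸ ht, rfl⟩
  rw [List.idxOf_append_of_mem hmemj, hgj, pv_idxOf_map_cons, ← herase]

-- main: position in the lexicographic list = Lehmer rank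
theorem pv_rank_main : ∀ (q s : List Int), s.Pairwise (· < ·) → q ∈ PySem.List.permutations s s.length →
    ((PySem.List.permutations s s.length).idxOf q : Int) = pvRank q := by
  intro q
  induction q with
  | nil =>
      intro s _ hmem
      have hs : s = [] := List.eq_nil_of_length_eq_zero
        (by have := PySem.List.length_of_mem_permutations hmem; simpa using this.symm)
      subst hs
      simp [PySem.List.permutations_zero, pvRank]
  | cons x t ih =>
      intro s hp hmem
      have hnd : s.Nodup := hp.imp (fun h => ne_of_lt h)
      have hlq : (x::t).length = s.length := PySem.List.length_of_mem_permutations hmem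
      have hlen : s.length = t.length + 1 := by simpa using hlq.symm
      rw [hlen] at hmem ⊢
      obtain ⟨hx, ht⟩ := pv_mem_permutations_cons hnd hlen hmem
      rw [pv_idxOf_permutations_cons hnd hlen hmem]
      have hel : (s.erase x).length = t.length := by rw [List.length_erase]; simp [hx, hlen]
      have hperase : (s.erase x).Pairwise (· < ·) := hp.erase x
      have ihv := ih (s.erase x) hperase (by rw [hel]; exact ht)
      rw [hel] at ihv
      have htperm : t.Perm (s.erase x) :=
        PySem.List.perm_of_mem_permutations (by rw [hel]; exact ht)
      have hcount : (t.map (fun y => if y < x then (1:Int) else 0)).sum = (s.idxOf x : Int) := by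
        have hite : (t.map (fun y => if y < x then (1:Int) else 0))
            = (t.map (fun y => if decide (y < x) = true then (1:Int) else 0)) := by
          apply List.map_congr_left; intro y _; simp
        rw [hite, PySem.List.sum_map_ite_one_zero (fun y => decide (y < x)) t]
        congr 1
        rw [htperm.countP_eq]
        have hsc : s.countP (fun y => decide (y < x)) = (s.erase x).countP (fun y => decide (y < x)) := by
          rw [(List.perm_cons_erase hx).countP_eq]
          simp [List.countP_cons]
        rw [← hsc, pv_countP_lt_eq_idxOf s x hp hx]
      rw [pv_rank_cons, hcount, pv_fact_eq t.length]
      push_cast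
      rw [ihv]

-- dict of enumerate: lookup of a nodup key list gives its index
theorem pv_dict_fold_preserve (q : List Int) : ∀ (xs : List (List Int)) (st : Int) (d : PySem.Dict (List Int) Int),
    q ∉ xs → ((PySem.List.enumerate xs st).foldl (fun d ip => d.insert ip.2 ip.1) d).get? q = d.get? q := by
  intro xs
  induction xs with
  | nil => intro st d _; rfl
  | cons x xs ih =>
      intro st d hq
      rw [PySem.List.enumerate_cons, List.foldl_cons]
      rw [ih _ _ (fun h => hq (List.mem_cons_of_mem _ h))]
      exact PySem.Dict.get?_insert_of_ne d st (fun h => hq (h ▸ List.mem_cons_self))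

theorem pv_dict_fold_get (q : List Int) : ∀ (xs : List (List Int)) (st : Int) (d : PySem.Dict (List Int) Int),
    xs.Nodup → q ∈ xs →
    ((PySem.List.enumerate xs st).foldl (fun d ip => d.insert ip.2 ip.1) d).get? q = some (st + (xs.idxOf q : Int)) := by
  intro xs
  induction xs with
  | nil => intro st d _ h; simp at h
  | cons x xs ih =>
      intro st d hnd hq
      rw [PySem.List.enumerate_cons, List.foldl_cons]
      rcases List.mem_cons.1 hq with h | h
      · subst h
        rw [pv_dict_fold_preserve _ _ _ _ (List.nodup_cons.1 hnd).1]
        simp [PySem.Dict.get?_insert_self]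
      · have hne : q ≠ x := fun hh => (List.nodup_cons.1 hnd).1 (hh ▸ h)
        rw [ih (st+1) _ (List.nodup_cons.1 hnd).2 h]
        simp [hne.symm]
        ring

-- swapping adjacent entries is a rearrangement
theorem pv_swap_perm : ∀ (k : Nat) (p : List Int), k + 1 < p.length → (pvSwapAdj p k).Perm p := by
  intro k
  induction k with
  | zero =>
      intro p h
      match p, h with
      | a :: b :: r, _ =>
        show (pvSwapAdj (a :: b :: r) 0).Perm (a :: b :: r)
        have : pvSwapAdj (a :: b :: r) 0 = b :: a :: r := by
          simp [pvSwapAdj, List.set, List.getD]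
        rw [this]
        exact List.Perm.swap a b r
  | succ k ih =>
      intro p h
      match p, h with
      | a :: p', h =>
        have : pvSwapAdj (a :: p') (k+1) = a :: pvSwapAdj p' k := by
          simp [pvSwapAdj, List.set, List.getD]
        rw [this]
        exact (ih p' (by simp at h; omega)).cons a

-- ===== VERDICT (by name: the statement is the Claim_ definition above) =====
theorem cayley_adj_n_spec : Claim_equal_cayley_adj_n := by
  intro n _
  unfold Spec_cayley_adj_n cayley_adj_n cayley_adj_n_alt
  dsimp only
  refine Prod.ext rfl ?_
  show (PySem.List.enumerate (PySem.List.permutations (PySem.List.pyRange 0 n 1) (PySem.List.pyRange 0 n 1).length)).map _ = _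
  set s := PySem.List.pyRange 0 n 1 with hs
  set all := PySem.List.permutations s s.length with hall
  have hsp : s.Pairwise (· < ·) := PySem.List.pairwise_lt_pyRange_one 0 n
  have hsnd : s.Nodup := hsp.imp (fun h => ne_of_lt h)
  have hand : all.Nodup := pv_nodup_permutations s.length s hsnd rfl
  -- collapse A's enumerate (idx is unused in the row)
  have henum : ∀ (g : List Int → List Int),
      (PySem.List.enumerate all).map (fun ip => g ip.2) = all.map g := by
    intro g
    have : (fun (ip : Int × List Int) => g ip.2) = g ∘ (fun ip => ip.2) := rfl
    rw [this, ← List.map_map, PySem.List.map_snd_enumerate]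
  rw [henum (fun p => (PySem.List.pyRange 0 (n-1) 1).map (fun k =>
        (((PySem.List.enumerate all).foldl (fun d ip => d.insert ip.2 ip.1) PySem.Dict.empty).get?
          (pvSwapAdj p k.toNat)).getD 0))]
  show _ = all.map (fun p => List.map (fun k => pvRank (pvSwapAdj p k.toNat)) (PySem.List.pyRange 0 (n - 1) 1))
  apply List.map_congr_left
  intro p hp
  apply List.map_congr_left
  intro k hk
  rcases PySem.List.mem_pyRange_one.1 hk with ⟨hk0, hk1⟩
  have hpperm : p.Perm s := PySem.List.perm_of_mem_permutations hp
  have hplen : p.length = s.length := hpperm.length_eq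
  have hslen : s.length = n.toNat := by rw [hs, PySem.List.length_pyRange_one]; simp
  have hkl : k.toNat + 1 < p.length := by
    rw [hplen, hslen]; omega
  have hqperm : (pvSwapAdj p k.toNat).Perm s := (pv_swap_perm k.toNat p hkl).trans hpperm
  have hqmem : pvSwapAdj p k.toNat ∈ all := pv_mem_permutations_of_perm s.length s _ rfl hqperm
  rw [pv_dict_fold_get _ all 0 _ hand hqmem]
  simp only [Option.getD_some]
  rw [zero_add]
  exact pv_rank_main _ s hsp hqmem
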